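-- pv_equiv track=rewrite | github.com/michaelyuen815/Algorithm_DataMining | py_frequentItems.py | generate_itemset
-- ===== SOURCE A (Python) =====
-- def generate_itemset(numitemin1set, basket):
--     #running recursion to generate
--     itemsets = []
--     for i in range(len(basket)):
--         if numitemin1set == 1:
--             itemsets.append(basket[i])
--         else:
--             temp = generate_itemset(numitemin1set - 1, basket[i+1:])
--             for itemset in temp:
--                 itemsets.append("".join(sorted([basket[i]+itemset])))
--     return itemsets
-- ===== SOURCE B (Python) =====
-- def generate_itemset(numitemin1set, basket):
--     # iterative DP over suffixes: table[j] = all size-j concatenated combinations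
--     if numitemin1set < 1 or numitemin1set > len(basket):
--         return []
--     k = numitemin1set
--     table = [[""]] + [[] for _ in range(k)]
--     for x in reversed(basket):
--         for j in range(k, 0, -1):
--             table[j] = [x + c for c in table[j - 1]] + table[j]
--     return table[k]
-- ===== Notes on version B (the rewrite author's own statement) =====
-- stated objective: alternative
-- what changed: Replaces A's slice-and-recurse generation (recursing on numitemin1set-1 over basket[i+1:] with a redundant join(sorted([...])) on singletons) with an iterative bottom-up DP over suffixes that maintains a table of combination lists for every size 0..k, guarded by the natural 1 <= k <= len(basket) bounds.
import Mathlib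
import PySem

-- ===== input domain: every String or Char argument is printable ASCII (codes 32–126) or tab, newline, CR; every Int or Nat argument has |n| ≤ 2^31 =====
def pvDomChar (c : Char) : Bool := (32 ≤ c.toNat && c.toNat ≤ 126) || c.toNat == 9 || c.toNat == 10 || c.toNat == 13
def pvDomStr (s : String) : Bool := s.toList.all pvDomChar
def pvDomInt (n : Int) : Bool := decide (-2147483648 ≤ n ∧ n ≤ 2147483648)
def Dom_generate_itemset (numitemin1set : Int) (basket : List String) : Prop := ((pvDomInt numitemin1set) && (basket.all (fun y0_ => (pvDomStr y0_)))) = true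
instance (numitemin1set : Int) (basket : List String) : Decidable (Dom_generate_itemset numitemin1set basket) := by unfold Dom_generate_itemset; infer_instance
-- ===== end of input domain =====

-- B replaces A's slice-and-recurse generation by an iterative suffix DP over a table of
-- combination sizes (alternative decomposition; same asymptotic output cost).

-- Python string '+' (kernel-reducible; Lean's String ++ is opaque to the kernel)
def pvCat (a b : String) : String := String.ofList (a.toList ++ b.toList)

-- ===== PORT A =====
-- the Python for-loop over i with basket[i] / basket[i+1:] is transcribed as structural
-- recursion on the list: head b plays basket[i], rest plays basket[i+1:]
def generate_itemset (numitemin1set : Int) (basket : List String) : List String :=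
  match basket with
  | [] => []
  | b :: rest =>
    (if numitemin1set = 1 then [b]
     else (generate_itemset (numitemin1set - 1) rest).map
            (fun itemset => PySem.Str.join "" (PySem.List.sorted [pvCat b itemset] (fun s => s) false)))
    ++ generate_itemset numitemin1set rest

-- ===== PORT B =====
-- one in-place step of Source B's inner 'for j in range(k, 0, -1)' loop:
-- new[0] = old[0]; for j ≥ 1, new[j] = [x + c for c in old[j-1]] + old[j]
def pvStepAux (x : String) (prev : List String) : List (List String) → List (List String)
  | [] => []
  | cur :: rest => (prev.map (fun c => pvCat x c) ++ cur) :: pvStepAux x cur rest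

def pvStep (x : String) (tbl : List (List String)) : List (List String) :=
  match tbl with
  | [] => []
  | t0 :: rest => t0 :: pvStepAux x t0 rest

def generate_itemset_alt (numitemin1set : Int) (basket : List String) : List String :=
  if numitemin1set < 1 ∨ numitemin1set > (basket.length : Int) then []
  else
    (basket.reverse.foldl (fun tbl x => pvStep x tbl)
      ([""] :: List.replicate numitemin1set.toNat [])).getD numitemin1set.toNat []

-- ===== PRECONDITION & SPEC =====
def Spec_generate_itemset (numitemin1set : Int) (basket : List String) (out : List String) : Prop := out = generate_itemset_alt numitemin1set basket
instance (numitemin1set : Int) (basket : List String) (out : List String) : Decidable (Spec_generate_itemset numitemin1set basket out) := by unfold Spec_generate_itemset; infer_instance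

-- ===== CLAIM (what is proved, stated in full; the proofs are below) =====
def Claim_equal_generate_itemset : Prop := ∀ (numitemin1set : Int) (basket : List String), Dom_generate_itemset numitemin1set basket → Spec_generate_itemset numitemin1set basket (generate_itemset numitemin1set basket)

-- ===== LEMMAS AND PROOFS =====

-- the common mathematical object: size-j concatenated combinations of a list, first index first
def pvComb : Nat → List String → List String
  | 0, _ => [""]
  | _ + 1, [] => []
  | j + 1, b :: rest => (pvComb j rest).map (fun c => pvCat b c) ++ pvComb (j + 1) rest

theorem pvCat_empty (b : String) : pvCat b "" = b := by
  simp [pvCat]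

theorem pvA_nonpos (k : Int) (basket : List String) (hk : k ≤ 0) :
    generate_itemset k basket = [] := by
  induction basket generalizing k with
  | nil => rfl
  | cons b rest ih =>
    have h1 : k ≠ 1 := by omega
    simp [generate_itemset, h1, ih (k - 1) (by omega), ih k hk]

theorem pvJoin_single (y : String) :
    PySem.Str.join "" (PySem.List.sorted [y] (fun s => s) false) = y := by
  simp [PySem.List.sorted, PySem.List.insertBy, PySem.Str.join]

theorem pvA_pos (n : Nat) (basket : List String) (hn : 1 ≤ n) :
    generate_itemset (n : Int) basket = pvComb n basket := by
  induction basket generalizing n with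
  | nil => cases n with
    | zero => omega
    | succ m => rfl
  | cons b rest ih =>
    by_cases h1 : n = 1
    · subst h1
      have h := ih 1 le_rfl
      push_cast at h
      simp [generate_itemset, pvComb, h, pvCat_empty]
    · obtain ⟨m, rfl⟩ : ∃ m, n = m + 1 := ⟨n - 1, by omega⟩
      have hm1 : 1 ≤ m := by omega
      have hne : ((m : Int) + 1) ≠ 1 := by
        intro h
        apply h1
        omega
      have ihm : generate_itemset (m : Int) rest = pvComb m rest := ih m hm1
      have ihm1 : generate_itemset ((m : Int) + 1) rest = pvComb (m + 1) rest := by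
        have h := ih (m + 1) (by omega)
        push_cast at h
        exact h
      have hc : (m : Int) + 1 - 1 = (m : Int) := by ring
      simp only [generate_itemset, pvComb]
      push_cast
      rw [if_neg hne, hc, ihm, ihm1]
      simp [pvJoin_single]

theorem pvComb_big (n : Nat) (basket : List String) (h : basket.length < n) :
    pvComb n basket = [] := by
  induction basket generalizing n with
  | nil => cases n with
    | zero => omega
    | succ m => rfl
  | cons b rest ih =>
    cases n with
    | zero => omega
    | succ m =>
      simp only [pvComb]
      rw [ih m (by simp at h; omega), ih (m + 1) (by simp at h; omega)]
      simp

theorem pvStepAux_spec (x : String) (s : List String) (m j : Nat) :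
    pvStepAux x (pvComb j s) ((List.range m).map (fun i => pvComb (j + 1 + i) s)) =
      (List.range m).map (fun i => pvComb (j + 1 + i) (x :: s)) := by
  induction m generalizing j with
  | zero => rfl
  | succ m ih =>
    rw [List.range_succ_eq_map]
    simp only [List.map_cons, List.map_map, pvStepAux, Nat.add_zero]
    have hmap : ∀ (t : List String),
        (List.range m).map ((fun i => pvComb (j + 1 + i) t) ∘ Nat.succ) =
        (List.range m).map (fun i => pvComb (j + 1 + 1 + i) t) := by
      intro t
      apply List.map_congr_left
      intro i _
      simp only [Function.comp]
      congr 1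
      omega
    rw [hmap s, hmap (x :: s), ih (j + 1)]
    simp [pvComb]

theorem pvStep_spec (x : String) (s : List String) (kn : Nat) :
    pvStep x ((List.range (kn + 1)).map (fun j => pvComb j s)) =
      (List.range (kn + 1)).map (fun j => pvComb j (x :: s)) := by
  rw [List.range_succ_eq_map]
  simp only [List.map_cons, List.map_map, pvStep]
  have hmap : ∀ (t : List String),
      (List.range kn).map ((fun j => pvComb j t) ∘ Nat.succ) =
      (List.range kn).map (fun i => pvComb (0 + 1 + i) t) := by
    intro t
    apply List.map_congr_left
    intro i _
    simp only [Function.comp]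
    congr 1
    omega
  rw [hmap s, hmap (x :: s), pvStepAux_spec x s kn 0]
  simp [pvComb]

theorem pvInit_eq (kn : Nat) :
    ([""] :: List.replicate kn ([] : List String)) =
      (List.range (kn + 1)).map (fun j => pvComb j ([] : List String)) := by
  rw [List.range_succ_eq_map]
  simp only [List.map_cons, List.map_map]
  have h : ∀ i ∈ List.range kn,
      ((fun j => pvComb j ([] : List String)) ∘ Nat.succ) i = (fun _ => ([] : List String)) i := by
    intro i _
    rfl
  rw [List.map_congr_left h]
  have h2 : (List.range kn).map (fun _ => ([] : List String)) = List.replicate kn [] := by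
    simp
  rw [h2]
  simp [pvComb]

theorem pvFold_spec (basket : List String) (kn : Nat) :
    basket.reverse.foldl (fun tbl x => pvStep x tbl) ([""] :: List.replicate kn []) =
      (List.range (kn + 1)).map (fun j => pvComb j basket) := by
  rw [pvInit_eq]
  induction basket with
  | nil => rfl
  | cons b rest ih =>
    simp only [List.reverse_cons, List.foldl_append, List.foldl_cons, List.foldl_nil]
    rw [ih, pvStep_spec]

theorem pvAlt_eq (k : Int) (basket : List String) :
    generate_itemset_alt k basket =
      if k < 1 ∨ k > (basket.length : Int) then [] else pvComb k.toNat basket := by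
  unfold generate_itemset_alt
  split_ifs with h
  · rfl
  · rw [pvFold_spec]
    rw [List.getD_eq_getElem?_getD]
    rw [List.getElem?_map, List.getElem?_range (by omega)]
    rfl

-- ===== VERDICT (by name: the statement is the Claim_ definition above) =====
theorem generate_itemset_spec : Claim_equal_generate_itemset := by
  intro k basket _
  unfold Spec_generate_itemset
  rw [pvAlt_eq]
  split_ifs with h
  · rcases h with h | h
    · exact pvA_nonpos k basket (by omega)
    · have hk : k ≤ 0 ∨ 1 ≤ k := by omega
      rcases hk with hk | hk
      · exact pvA_nonpos k basket hk
      · have heq : generate_itemset k basket = pvComb k.toNat basket := by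
          have h2 := pvA_pos k.toNat basket (by omega)
          rwa [Int.toNat_of_nonneg (by omega)] at h2
        rw [heq]
        exact pvComb_big _ _ (by omega)
  · push Not at h
    have h2 := pvA_pos k.toNat basket (by omega)
    rwa [Int.toNat_of_nonneg (by omega)] at h2
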